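-- pv_equiv track=rewrite | github.com/sbaresearch/icmpv6-destination-reachable | bvalues/tools/bvalues/vis/cdf_rtt.py | get_next_resp_type
-- ===== SOURCE A (Python) =====
-- keys_ordered=["NR","AP","AU","PU","RR","TX"]
--
-- def get_next_resp_type(response_types,i,x):
--
-- 	wanted=keys_ordered[i]
--
-- 	response_type,group=response_types[x]
-- 	if response_type == wanted:
-- 		#response_type=translate_types[response_type]
-- 		return response_type,group
-- 	else:
-- 		x+=1
-- 		return get_next_resp_type(response_types,i,x)
-- ===== SOURCE B (Python) =====
-- keys_ordered=["NR","AP","AU","PU","RR","TX"]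
--
-- def get_next_resp_type(response_types, i, x):
--     wanted = keys_ordered[i]
--     while True:
--         response_type, group = response_types[x]
--         if response_type == wanted:
--             return response_type, group
--         x += 1
-- ===== Notes on version B (the rewrite author's own statement) =====
-- stated objective: idiomatic
-- what changed: Replaces the tail recursion with an explicit while-True loop that advances the index, keeping the identical indexing and IndexError behaviour without growing the call stack.
import Mathlib
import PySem

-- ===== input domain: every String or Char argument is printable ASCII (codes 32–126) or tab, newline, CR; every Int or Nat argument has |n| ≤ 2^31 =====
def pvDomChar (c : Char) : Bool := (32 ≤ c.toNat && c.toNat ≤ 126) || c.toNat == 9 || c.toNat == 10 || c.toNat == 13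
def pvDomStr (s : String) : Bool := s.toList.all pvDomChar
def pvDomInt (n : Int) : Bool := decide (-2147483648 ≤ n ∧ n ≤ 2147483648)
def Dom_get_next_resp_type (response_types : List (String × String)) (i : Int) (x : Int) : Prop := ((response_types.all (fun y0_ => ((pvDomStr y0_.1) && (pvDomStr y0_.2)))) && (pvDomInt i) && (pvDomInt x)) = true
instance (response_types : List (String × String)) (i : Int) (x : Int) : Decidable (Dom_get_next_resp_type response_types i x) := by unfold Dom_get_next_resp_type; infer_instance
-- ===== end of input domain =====

-- B replaces A's tail recursion by an explicit while-True loop over an advancing index (same values; equivalence is about return values, both raise alike in Python).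

-- ===== PORT A =====
def keys_ordered : List String := ["NR", "AP", "AU", "PU", "RR", "TX"]

-- literal transliteration of A's tail recursion; the two ("","") branches are the
-- IndexError points (keys_ordered[i] resp. response_types[x]), excluded by Pre_.
def get_next_resp_type (response_types : List (String × String)) (i : Int) (x : Int) : String × String :=
  match PySem.List.pyGet? keys_ordered i with
  | none => ("", "")
  | some wanted =>
    match h : PySem.List.pyGet? response_types x with
    | none => ("", "")
    | some (response_type, group) =>
      if response_type == wanted then (response_type, group)
      else get_next_resp_type response_types i (x + 1)
termination_by ((response_types.length : Int) - x).toNat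
decreasing_by
  have h2 : ¬ (PySem.List.pyGet? response_types x = none) := by simp [h]
  rw [PySem.List.pyGet?_eq_none_iff] at h2
  simp only [not_not] at h2
  unfold PySem.Raise.InRange at h2
  omega

-- ===== PORT B =====
-- the while-True body of Source B; fuel bounds the loop (it is always sufficient:
-- Python's loop stops — with a return or an IndexError — after ≤ len - x accesses).
def get_next_loop (response_types : List (String × String)) (wanted : String) :
    Nat → Int → String × String
  | 0, _ => ("", "")
  | fuel + 1, x =>
    match PySem.List.pyGet? response_types x with
    | none => ("", "")
    | some (response_type, group) =>
      if response_type == wanted then (response_type, group)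
      else get_next_loop response_types wanted fuel (x + 1)

def get_next_resp_type_alt (response_types : List (String × String)) (i : Int) (x : Int) : String × String :=
  match PySem.List.pyGet? keys_ordered i with
  | none => ("", "")
  | some wanted =>
    get_next_loop response_types wanted (((response_types.length : Int) - x).toNat + 1) x

-- ===== PRECONDITION & SPEC =====
-- Pre_ = exactly the inputs on which Python A returns (no IndexError): i a valid
-- index into keys_ordered, x ≥ -len(response_types), and some entry at python
-- index j ∈ [x, len) carries the wanted key.
def Pre_get_next_resp_type (response_types : List (String × String)) (i : Int) (x : Int) : Prop :=
  ∃ w, PySem.List.pyGet? keys_ordered i = some w ∧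
    -((response_types.length : Int)) ≤ x ∧
    ∃ j ∈ List.range response_types.length,
      x ≤ (j : Int) ∧ response_types[j]?.map Prod.fst = some w

instance (response_types : List (String × String)) (i : Int) (x : Int) : Decidable (Pre_get_next_resp_type response_types i x) := by unfold Pre_get_next_resp_type; infer_instance

def pvWitness_get_next_resp_type : (List (String × String)) × Int × Int :=
  ([("AP", "g1"), ("NR", "g2")], 0, 0)

def Spec_get_next_resp_type (response_types : List (String × String)) (i : Int) (x : Int) (out : String × String) : Prop := out = get_next_resp_type_alt response_types i x
instance (response_types : List (String × String)) (i : Int) (x : Int) (out : String × String) : Decidable (Spec_get_next_resp_type response_types i x out) := by unfold Spec_get_next_resp_type; infer_instance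

-- ===== CLAIM (what is proved, stated in full; the proofs are below) =====
def Claim_equal_get_next_resp_type : Prop := ∀ (response_types : List (String × String)) (i : Int) (x : Int), Dom_get_next_resp_type response_types i x → Pre_get_next_resp_type response_types i x → Spec_get_next_resp_type response_types i x (get_next_resp_type response_types i x)

-- ===== LEMMAS AND PROOFS =====

-- given enough fuel, B's loop computes exactly A's recursion
theorem get_next_loop_eq (response_types : List (String × String)) (i : Int) (w : String)
    (hk : PySem.List.pyGet? keys_ordered i = some w) :
    ∀ (fuel : Nat) (x : Int), ((response_types.length : Int) - x).toNat < fuel →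
      get_next_loop response_types w fuel x = get_next_resp_type response_types i x := by
  intro fuel
  induction fuel with
  | zero => intro x hx; omega
  | succ n ih =>
    intro x hx
    rw [get_next_resp_type.eq_def, hk]
    cases h : PySem.List.pyGet? response_types x with
    | none => simp [get_next_loop, h]
    | some p =>
      obtain ⟨t, g⟩ := p
      have h2 : ¬ (PySem.List.pyGet? response_types x = none) := by simp [h]
      rw [PySem.List.pyGet?_eq_none_iff] at h2
      simp only [not_not] at h2
      unfold PySem.Raise.InRange at h2
      by_cases ht : (t == w) = true
      · simp [get_next_loop, h, ht]
      · simp only [get_next_loop, h, ht, Bool.false_eq_true, if_false]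
        exact ih (x + 1) (by omega)

theorem get_next_resp_type_spec : Claim_equal_get_next_resp_type := by
  intro response_types i x _hD _hP
  unfold Spec_get_next_resp_type get_next_resp_type_alt
  cases hk : PySem.List.pyGet? keys_ordered i with
  | none => rw [get_next_resp_type.eq_def, hk]
  | some w =>
    exact (get_next_loop_eq response_types i w hk _ x (by omega)).symm
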